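-- pv_equiv track=rewrite | github.com/xpxxx/awesome-a2a-agents | scripts/parse_crewai_repos.py | guess_llm_label
-- ===== SOURCE A (Python) =====
-- from typing import Dict, List, Optional, Tuple, Union
--
-- def guess_llm_label(value: Optional[str]) -> Optional[str]:
--     if not value:
--         return None
--     v = value.lower()
--     if any(k in v for k in ['gpt', 'o1', 'o3']):
--         return f"openai:{value}"
--     if 'claude' in v:
--         return f"anthropic:{value}"
--     if 'gemini' in v:
--         return f"google:{value}"
--     if 'llama' in v or 'ollama' in v:
--         return f"ollama:{value}"
--     if 'mistral' in v:
--         return f"mistral:{value}"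
--     return 'unknown'
-- ===== SOURCE B (Python) =====
-- # B: instead of a chain of `in` membership tests, scan the lowered string once,
-- # position by position; at each position try every keyword and keep the match of
-- # highest priority (lowest rank) seen so far; the final best rank picks the label.
-- _KEYWORDS = [
--     ('gpt', 0, 'openai'), ('o1', 0, 'openai'), ('o3', 0, 'openai'),
--     ('claude', 1, 'anthropic'),
--     ('gemini', 2, 'google'),
--     ('llama', 3, 'ollama'), ('ollama', 3, 'ollama'),
--     ('mistral', 4, 'mistral'),
-- ]
--
-- def guess_llm_label(value):
--     if not value:
--         return None
--     v = value.lower()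
--     best = None
--     for i in range(len(v)):
--         for kw, rank, prefix in _KEYWORDS:
--             if v.startswith(kw, i) and (best is None or rank < best[0]):
--                 best = (rank, prefix)
--     if best is None:
--         return 'unknown'
--     return f"{best[1]}:{value}"
-- ===== Notes on version B (the rewrite author's own statement) =====
-- stated objective: alternative
-- what changed: B replaces A's chain of substring-membership tests with a single position-by-position scan of the lowered string that tries every keyword at each index and keeps the best-ranked match in an accumulator, deciding the label from that minimum rank at the end.
import Mathlib
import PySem

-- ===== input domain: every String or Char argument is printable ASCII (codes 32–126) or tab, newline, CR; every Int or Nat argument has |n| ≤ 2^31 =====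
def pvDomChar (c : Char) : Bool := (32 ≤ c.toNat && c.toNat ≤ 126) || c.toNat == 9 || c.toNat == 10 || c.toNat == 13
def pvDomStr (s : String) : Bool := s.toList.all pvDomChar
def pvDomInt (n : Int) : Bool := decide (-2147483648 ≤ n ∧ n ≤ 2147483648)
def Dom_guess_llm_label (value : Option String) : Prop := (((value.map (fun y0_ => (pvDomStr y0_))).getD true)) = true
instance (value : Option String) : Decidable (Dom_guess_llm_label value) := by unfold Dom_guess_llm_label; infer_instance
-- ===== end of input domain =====

-- B replaces A's chain of substring-membership tests by a single position-by-position scan of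
-- the lowered string that tries each keyword at every index and keeps the best-ranked match.

-- ===== PORT A =====
def guess_llm_label (value : Option String) : Option String :=
  match value with
  | none => none
  | some s =>
    if s = "" then none
    else
      let v := PySem.Str.lower s
      if (["gpt", "o1", "o3"].any (fun k => PySem.Str.isIn k v)) then some ("openai:" ++ s)
      else if PySem.Str.isIn "claude" v then some ("anthropic:" ++ s)
      else if PySem.Str.isIn "gemini" v then some ("google:" ++ s)
      else if PySem.Str.isIn "llama" v || PySem.Str.isIn "ollama" v then some ("ollama:" ++ s)
      else if PySem.Str.isIn "mistral" v then some ("mistral:" ++ s)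
      else some "unknown"

-- ===== PORT B =====
-- Source B's keyword table (keyword, rank, provider prefix)
def pvKeywords : List (String × Nat × String) :=
  [ ("gpt", 0, "openai"), ("o1", 0, "openai"), ("o3", 0, "openai"),
    ("claude", 1, "anthropic"),
    ("gemini", 2, "google"),
    ("llama", 3, "ollama"), ("ollama", 3, "ollama"),
    ("mistral", 4, "mistral") ]

-- v.startswith(kw, i) for 0 ≤ i ≤ len(v): prefix test at offset i (exact on this range)
def pvStartsAt (v : List Char) (i : Nat) (kw : String) : Bool :=
  kw.toList.isPrefixOf (v.drop i)

-- Source B's nested loop: scan every position, try every keyword, keep the best (lowest) rank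
def pvBest (v : List Char) : Option (Nat × String) :=
  (List.range v.length).foldl
    (fun best i =>
      pvKeywords.foldl
        (fun best t =>
          if pvStartsAt v i t.1 && (match best with
              | none => true
              | some bp => decide (t.2.1 < bp.1)) then some t.2 else best)
        best)
    none

def guess_llm_label_alt (value : Option String) : Option String :=
  match value with
  | none => none
  | some s =>
    if s = "" then none
    else
      match pvBest (PySem.Str.lower s).toList with
      | none => some "unknown"
      | some bp => some (bp.2 ++ ":" ++ s)

-- ===== PRECONDITION & SPEC =====
def Spec_guess_llm_label (value : Option String) (out : Option String) : Prop := out = guess_llm_label_alt value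
instance (value : Option String) (out : Option String) : Decidable (Spec_guess_llm_label value out) := by unfold Spec_guess_llm_label; infer_instance

-- ===== CLAIM (what is proved, stated in full; the proofs are below) =====
def Claim_equal_guess_llm_label : Prop := ∀ (value : Option String), Dom_guess_llm_label value → Spec_guess_llm_label value (guess_llm_label value)

-- ===== LEMMAS AND PROOFS =====

-- one accumulator step of B's scan, on an already-filtered candidate (rank, prefix)
def pvMinStep (b : Option (Nat × String)) (c : Nat × String) : Option (Nat × String) :=
  if (match b with | none => true | some bp => decide (c.1 < bp.1)) then some c else b

-- all (rank, prefix) candidates B's nested loop ever accepts for its condition, in scan order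
def pvCands (v : List Char) : List (Nat × String) :=
  (List.range v.length).flatMap (fun i =>
    (pvKeywords.filter (fun t => pvStartsAt v i t.1)).map (fun t => t.2))

def pvName : Nat → String
  | 0 => "openai" | 1 => "anthropic" | 2 => "google" | 3 => "ollama" | _ => "mistral"

def pvPmin : Option Nat → List Nat → Option Nat
  | o, [] => o
  | none, p :: l => pvPmin (some p) l
  | some q, p :: l => pvPmin (some (min q p)) l

lemma pv_inner_eq (v : List Char) (i : Nat) (tbl : List (String × Nat × String))
    (b : Option (Nat × String)) :
    tbl.foldl
      (fun best t =>
        if pvStartsAt v i t.1 && (match best with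
            | none => true
            | some bp => decide (t.2.1 < bp.1)) then some t.2 else best) b
    = ((tbl.filter (fun t => pvStartsAt v i t.1)).map (fun t => t.2)).foldl pvMinStep b := by
  induction tbl generalizing b with
  | nil => rfl
  | cons t rest ih =>
    simp only [List.foldl_cons, List.filter_cons]
    by_cases h : pvStartsAt v i t.1 = true
    · rw [if_pos h]
      simp only [List.map_cons, List.foldl_cons]
      rw [ih]
      congr 1
      simp [pvMinStep, h]
    · rw [if_neg h]
      rw [ih]
      congr 1
      simp [h]

lemma pv_best_eq_fold (v : List Char) :
    pvBest v = (pvCands v).foldl pvMinStep none := by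
  unfold pvBest pvCands
  generalize List.range v.length = l
  induction l generalizing v with
  | nil => rfl
  | cons i rest ih =>
    simp only [List.foldl_cons, List.flatMap_cons, List.foldl_append]
    rw [pv_inner_eq]
    -- now both sides are the same fold shape over rest; generalize acc
    generalize (((pvKeywords.filter (fun t => pvStartsAt v i t.1)).map (fun t => t.2)).foldl pvMinStep none) = b
    clear ih
    induction rest generalizing b with
    | nil => rfl
    | cons j rest' ih' =>
      simp only [List.foldl_cons, List.flatMap_cons, List.foldl_append]
      rw [pv_inner_eq]
      exact ih' _

lemma pvPmin_some (l : List Nat) : ∀ q, pvPmin (some q) l = some (l.foldl min q) := by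
  induction l with
  | nil => intro q; rfl
  | cons p l ih => intro q; simp [pvPmin, ih]

lemma pvPmin_none_eq_min? (l : List Nat) : pvPmin none l = l.min? := by
  cases l with
  | nil => rfl
  | cons p l => simp [pvPmin, pvPmin_some, List.min?]

lemma pv_fold_min (cs : List (Nat × String)) :
    ∀ (b : Option (Nat × String)),
      (∀ c ∈ cs, c.2 = pvName c.1) → (∀ bp, b = some bp → bp.2 = pvName bp.1) →
      cs.foldl pvMinStep b
        = (pvPmin (b.map Prod.fst) (cs.map Prod.fst)).map (fun p => (p, pvName p)) := by
  induction cs with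
  | nil =>
    intro b _ hb
    cases b with
    | none => rfl
    | some bp =>
      simp only [List.foldl_nil, pvPmin, Option.map_some, List.map_nil]
      have := hb bp rfl
      cases bp with
      | mk p s => simp at this; simp [this]
  | cons c rest ih =>
    intro b hcs hb
    have hc : c.2 = pvName c.1 := hcs c (List.mem_cons_self ..)
    cases b with
    | none =>
      simp only [List.foldl_cons, List.map_cons, Option.map_none]
      have hstep : pvMinStep none c = some c := by simp [pvMinStep]
      rw [hstep]
      rw [ih (some c) (fun x hx => hcs x (List.mem_cons_of_mem _ hx))
            (by intro bp h; cases h; exact hc)]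
      rfl
    | some bp =>
      have hbp : bp.2 = pvName bp.1 := hb bp rfl
      simp only [List.foldl_cons, List.map_cons, Option.map_some]
      by_cases hlt : c.1 < bp.1
      · have hstep : pvMinStep (some bp) c = some c := by simp [pvMinStep, hlt]
        rw [hstep, ih (some c) (fun x hx => hcs x (List.mem_cons_of_mem _ hx))
              (by intro x h; cases h; exact hc)]
        have : min bp.1 c.1 = c.1 := by omega
        simp [pvPmin, this]
      · have hstep : pvMinStep (some bp) c = some bp := by simp [pvMinStep, hlt]
        rw [hstep, ih (some bp) (fun x hx => hcs x (List.mem_cons_of_mem _ hx))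
              (by intro x h; cases h; exact hbp)]
        have : min bp.1 c.1 = bp.1 := by omega
        simp [pvPmin, this]

lemma pv_cands_name (v : List Char) : ∀ c ∈ pvCands v, c.2 = pvName c.1 := by
  intro c hc
  simp only [pvCands, List.mem_flatMap, List.mem_map, List.mem_filter] at hc
  obtain ⟨i, _, t, ⟨ht, _⟩, rfl⟩ := hc
  fin_cases ht <;> rfl

lemma pv_startsAt_iff (kw : String) (h : kw.toList ≠ []) (v : List Char) :
    (∃ i, i < v.length ∧ pvStartsAt v i kw = true)
      ↔ PySem.Chars.isIn kw.toList v = true := by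
  rw [← PySem.Chars.exists_prefix_drop_iff_isIn]
  constructor
  · rintro ⟨i, _, hp⟩
    exact ⟨i, List.isPrefixOf_iff_prefix.mp hp⟩
  · rintro ⟨j, hp⟩
    have hj : j < v.length := by
      by_contra hge
      have hnil : v.drop j = [] := List.drop_eq_nil_of_le (le_of_not_gt hge)
      rw [hnil] at hp
      exact h (List.prefix_nil.mp hp)
    exact ⟨j, hj, List.isPrefixOf_iff_prefix.mpr hp⟩

-- membership of a rank among the candidates ↔ one of its keywords occurs in v
lemma pv_rank_mem (v : List Char) (p : Nat) :
    p ∈ (pvCands v).map Prod.fst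
      ↔ ∃ kw pre, (kw, p, pre) ∈ pvKeywords ∧ ∃ i, i < v.length ∧ pvStartsAt v i kw = true := by
  simp only [pvCands, List.map_flatMap, List.mem_flatMap, List.mem_range, List.map_map,
    List.mem_map, List.mem_filter, Function.comp]
  constructor
  · rintro ⟨i, hi, t, ⟨ht, hs⟩, rfl⟩
    exact ⟨t.1, t.2.2, by simpa using ht, i, hi, hs⟩
  · rintro ⟨kw, pre, ht, i, hi, hs⟩
    exact ⟨i, hi, (kw, p, pre), ⟨ht, hs⟩, rfl⟩

-- the five per-rank occurrence conditions
def pvInB (kw : String) (v : List Char) : Bool := PySem.Chars.isIn kw.toList v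

def pvIn (kw : String) (v : List Char) : Prop := pvInB kw v = true

lemma pv_rank_iff (v : List Char) (p : Nat) :
    p ∈ (pvCands v).map Prod.fst ↔
      (p = 0 ∧ (pvIn "gpt" v ∨ pvIn "o1" v ∨ pvIn "o3" v)) ∨
      (p = 1 ∧ pvIn "claude" v) ∨
      (p = 2 ∧ pvIn "gemini" v) ∨
      (p = 3 ∧ (pvIn "llama" v ∨ pvIn "ollama" v)) ∨
      (p = 4 ∧ pvIn "mistral" v) := by
  rw [pv_rank_mem]
  constructor
  · rintro ⟨kw, pre, ht, hex⟩
    fin_cases ht <;>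
      [ exact Or.inl ⟨rfl, Or.inl ((pv_startsAt_iff _ (by decide) v).mp hex)⟩;
        exact Or.inl ⟨rfl, Or.inr (Or.inl ((pv_startsAt_iff _ (by decide) v).mp hex))⟩;
        exact Or.inl ⟨rfl, Or.inr (Or.inr ((pv_startsAt_iff _ (by decide) v).mp hex))⟩;
        exact Or.inr (Or.inl ⟨rfl, (pv_startsAt_iff _ (by decide) v).mp hex⟩);
        exact Or.inr (Or.inr (Or.inl ⟨rfl, (pv_startsAt_iff _ (by decide) v).mp hex⟩));
        exact Or.inr (Or.inr (Or.inr (Or.inl ⟨rfl, Or.inl ((pv_startsAt_iff _ (by decide) v).mp hex)⟩)));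
        exact Or.inr (Or.inr (Or.inr (Or.inl ⟨rfl, Or.inr ((pv_startsAt_iff _ (by decide) v).mp hex)⟩)));
        exact Or.inr (Or.inr (Or.inr (Or.inr ⟨rfl, (pv_startsAt_iff _ (by decide) v).mp hex⟩)))]
  · rintro (⟨rfl, (h|h|h)⟩|⟨rfl, h⟩|⟨rfl, h⟩|⟨rfl, (h|h)⟩|⟨rfl, h⟩) <;>
      unfold pvIn pvInB at h <;>
      rw [← pv_startsAt_iff _ (by decide) v] at h <;>
      first
      | exact ⟨"gpt", "openai", by decide, h⟩
      | exact ⟨"o1", "openai", by decide, h⟩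
      | exact ⟨"o3", "openai", by decide, h⟩
      | exact ⟨"claude", "anthropic", by decide, h⟩
      | exact ⟨"gemini", "google", by decide, h⟩
      | exact ⟨"llama", "ollama", by decide, h⟩
      | exact ⟨"ollama", "ollama", by decide, h⟩
      | exact ⟨"mistral", "mistral", by decide, h⟩

lemma pv_best_char (v : List Char) :
    pvBest v = ((pvCands v).map Prod.fst).min?.map (fun p => (p, pvName p)) := by
  rw [pv_best_eq_fold, pv_fold_min _ none (pv_cands_name v) (by intro _ h; cases h)]
  simp [pvPmin_none_eq_min?]

lemma pv_min?_eq_some (P : List Nat) (p : Nat) (hmem : p ∈ P) (hle : ∀ q ∈ P, p ≤ q) :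
    P.min? = some p := by
  rw [List.min?_eq_some_iff]
  exact ⟨hmem, hle⟩

lemma pv_not_in (kw : String) (v : List Char) (hneg : pvInB kw v = false) : ¬ pvIn kw v := by
  simp [pvIn, hneg]

-- final characterization of B's scan result as A's decision chain
set_option maxHeartbeats 1000000 in
lemma pv_core (v : List Char) :
    pvBest v =
      (if pvInB "gpt" v || (pvInB "o1" v || pvInB "o3" v) then some ((0 : Nat), "openai")
       else if pvInB "claude" v then some (1, "anthropic")
       else if pvInB "gemini" v then some (2, "google")
       else if pvInB "llama" v || pvInB "ollama" v then some (3, "ollama")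
       else if pvInB "mistral" v then some (4, "mistral")
       else none) := by
  rw [pv_best_char]
  by_cases h0 : (pvInB "gpt" v || (pvInB "o1" v || pvInB "o3" v)) = true
  · rw [if_pos h0]
    simp only [Bool.or_eq_true] at h0
    have hmem : (0 : Nat) ∈ (pvCands v).map Prod.fst :=
      (pv_rank_iff v 0).mpr (Or.inl ⟨rfl, h0⟩)
    rw [pv_min?_eq_some _ 0 hmem (fun q _ => Nat.zero_le q)]
    rfl
  · rw [if_neg h0]
    simp only [Bool.or_eq_true, not_or, Bool.not_eq_true] at h0
    obtain ⟨hg, ho1, ho3⟩ := h0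
    by_cases h1 : pvInB "claude" v = true
    · rw [if_pos h1]
      have hmem : (1 : Nat) ∈ (pvCands v).map Prod.fst :=
        (pv_rank_iff v 1).mpr (Or.inr (Or.inl ⟨rfl, h1⟩))
      rw [pv_min?_eq_some _ 1 hmem ?_]
      · rfl
      · intro q hq
        rcases (pv_rank_iff v q).mp hq with ⟨rfl, (h|h|h)⟩|⟨rfl, _⟩|⟨rfl, _⟩|⟨rfl, _⟩|⟨rfl, _⟩ <;>
          first
          | exact absurd h (pv_not_in _ _ hg)
          | exact absurd h (pv_not_in _ _ ho1)
          | exact absurd h (pv_not_in _ _ ho3)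
          | omega
    · rw [if_neg h1]
      by_cases h2 : pvInB "gemini" v = true
      · rw [if_pos h2]
        have hmem : (2 : Nat) ∈ (pvCands v).map Prod.fst :=
          (pv_rank_iff v 2).mpr (Or.inr (Or.inr (Or.inl ⟨rfl, h2⟩)))
        rw [pv_min?_eq_some _ 2 hmem ?_]
        · rfl
        · intro q hq
          rcases (pv_rank_iff v q).mp hq with ⟨rfl, (h|h|h)⟩|⟨rfl, h⟩|⟨rfl, _⟩|⟨rfl, _⟩|⟨rfl, _⟩ <;>
            first
            | exact absurd h (pv_not_in _ _ hg)
            | exact absurd h (pv_not_in _ _ ho1)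
            | exact absurd h (pv_not_in _ _ ho3)
            | exact absurd h h1
            | omega
      · rw [if_neg h2]
        by_cases h3 : (pvInB "llama" v || pvInB "ollama" v) = true
        · rw [if_pos h3]
          simp only [Bool.or_eq_true] at h3
          have hmem : (3 : Nat) ∈ (pvCands v).map Prod.fst :=
            (pv_rank_iff v 3).mpr (Or.inr (Or.inr (Or.inr (Or.inl ⟨rfl, h3⟩))))
          rw [pv_min?_eq_some _ 3 hmem ?_]
          · rfl
          · intro q hq
            rcases (pv_rank_iff v q).mp hq with ⟨rfl, (h|h|h)⟩|⟨rfl, h⟩|⟨rfl, h⟩|⟨rfl, _⟩|⟨rfl, _⟩ <;>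
              first
              | exact absurd h (pv_not_in _ _ hg)
              | exact absurd h (pv_not_in _ _ ho1)
              | exact absurd h (pv_not_in _ _ ho3)
              | exact absurd h h1
              | exact absurd h h2
              | omega
        · rw [if_neg h3]
          simp only [Bool.or_eq_true, not_or, Bool.not_eq_true] at h3
          obtain ⟨hl, hol⟩ := h3
          by_cases h4 : pvInB "mistral" v = true
          · rw [if_pos h4]
            have hmem : (4 : Nat) ∈ (pvCands v).map Prod.fst :=
              (pv_rank_iff v 4).mpr (Or.inr (Or.inr (Or.inr (Or.inr ⟨rfl, h4⟩))))
            rw [pv_min?_eq_some _ 4 hmem ?_]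
            · rfl
            · intro q hq
              rcases (pv_rank_iff v q).mp hq with ⟨rfl, (h|h|h)⟩|⟨rfl, h⟩|⟨rfl, h⟩|⟨rfl, (h|h)⟩|⟨rfl, _⟩ <;>
                first
                | exact absurd h (pv_not_in _ _ hg)
                | exact absurd h (pv_not_in _ _ ho1)
                | exact absurd h (pv_not_in _ _ ho3)
                | exact absurd h h1
                | exact absurd h h2
                | exact absurd h (pv_not_in _ _ hl)
                | exact absurd h (pv_not_in _ _ hol)
                | omega
          · rw [if_neg h4]
            have hnil : (pvCands v).map Prod.fst = [] := by
              rw [List.eq_nil_iff_forall_not_mem]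
              intro q hq
              rcases (pv_rank_iff v q).mp hq with ⟨rfl, (h|h|h)⟩|⟨rfl, h⟩|⟨rfl, h⟩|⟨rfl, (h|h)⟩|⟨rfl, h⟩ <;>
                first
                | exact absurd h (pv_not_in _ _ hg)
                | exact absurd h (pv_not_in _ _ ho1)
                | exact absurd h (pv_not_in _ _ ho3)
                | exact absurd h h1
                | exact absurd h h2
                | exact absurd h (pv_not_in _ _ hl)
                | exact absurd h (pv_not_in _ _ hol)
                | exact absurd h h4
            rw [hnil]
            rfl

-- ===== VERDICT (by name: the statement is the Claim_ definition above) =====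
theorem guess_llm_label_spec : Claim_equal_guess_llm_label := by
  intro value _
  unfold Spec_guess_llm_label
  cases value with
  | none => rfl
  | some s =>
    simp only [guess_llm_label, guess_llm_label_alt]
    by_cases hs : s = ""
    · simp [hs]
    · rw [if_neg hs, if_neg hs]
      rw [pv_core]
      simp only [pvInB, List.any_cons, List.any_nil, PySem.Str.isIn_eq, Bool.or_false]
      split_ifs <;> rfl
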